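-- pv_equiv track=rewrite | github.com/mxtbyrm/etsy_pl_reports_dashboard | test_sku_normalization.py | normalize_sku_for_comparison
-- ===== SOURCE A (Python) =====
-- def normalize_sku_for_comparison(sku: str) -> str:
--     """
--     Normalize SKU for comparison by removing common prefixes and converting to lowercase.
--     """
--     if not sku:
--         return sku
--
--     prefixes_to_remove = [
--         "DELETED-",
--         "OT-",
--         "ZSTK-",
--         "MG-",
--         "LND-",
--         "EU-",
--         "US-",
--         "UK-",
--         "CA-",
--         "AU-",
--         "JP-",
--     ]
--
--     normalized_sku = sku.strip()
--
--     # Keep stripping prefixes until none match (handles multiple prefixes)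
--     # Compare case-insensitively by checking uppercase version
--     changed = True
--     while changed:
--         changed = False
--         for prefix in prefixes_to_remove:
--             if normalized_sku.upper().startswith(prefix):
--                 normalized_sku = normalized_sku[len(prefix):]
--                 changed = True
--                 break
--
--     # Convert to lowercase for case-insensitive comparison
--     return normalized_sku.lower()
-- ===== SOURCE B (Python) =====
-- _TOKENS = {"deleted", "ot", "zstk", "mg", "lnd", "eu", "us", "uk", "ca", "au", "jp"}
--
--
-- def normalize_sku_for_comparison(sku: str) -> str:
--     if not sku:
--         return sku
--     parts = sku.strip().lower().split('-')
--     i = 0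
--     while i < len(parts) - 1 and parts[i] in _TOKENS:
--         i += 1
--     return '-'.join(parts[i:])
-- ===== Notes on version B (the rewrite author's own statement) =====
-- stated objective: alternative
-- what changed: A's while/for prefix-peeling loop with a changed-flag and per-iteration .upper() calls is replaced by a token decomposition: split the stripped lowercased SKU on the dash separator, drop leading known tokens (never the final segment), and rejoin with dashes.
import Mathlib
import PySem

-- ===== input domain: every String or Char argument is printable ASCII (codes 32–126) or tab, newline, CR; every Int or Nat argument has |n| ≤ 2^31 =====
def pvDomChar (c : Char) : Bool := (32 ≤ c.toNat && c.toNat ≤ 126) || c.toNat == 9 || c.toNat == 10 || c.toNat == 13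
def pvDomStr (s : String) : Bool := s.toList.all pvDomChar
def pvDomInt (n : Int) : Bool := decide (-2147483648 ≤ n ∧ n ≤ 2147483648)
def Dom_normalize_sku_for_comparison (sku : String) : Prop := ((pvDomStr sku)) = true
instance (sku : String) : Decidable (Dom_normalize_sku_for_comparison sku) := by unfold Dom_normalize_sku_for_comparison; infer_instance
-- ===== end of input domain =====

-- B replaces A's while/for prefix-peeling loop (changed-flag, .upper() each pass) by a token
-- decomposition: split the stripped lowercase SKU on '-', drop leading known tokens (never the
-- last segment), rejoin; return value equivalence only (objective: alternative algorithm).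

-- ===== PORT A =====
def pvPrefixesA : List (List Char) :=
  ["DELETED-".toList, "OT-".toList, "ZSTK-".toList, "MG-".toList, "LND-".toList,
   "EU-".toList, "US-".toList, "UK-".toList, "CA-".toList, "AU-".toList, "JP-".toList]

-- the 'for prefix in prefixes_to_remove: if … break' pass: first prefix (in list order)
-- such that normalized_sku.upper().startswith(prefix)
def pvStepA (s : List Char) : Option (List Char) :=
  pvPrefixesA.find? (fun p => PySem.Chars.startswith (PySem.Chars.upper s) p)

-- the 'while changed' loop; each successful pass strips one prefix (a nonempty drop), so
-- fuel = length of the string bounds the number of iterations (fuel only makes it total)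
def pvLoopA : Nat → List Char → List Char
  | 0, s => s
  | fuel + 1, s =>
    match pvStepA s with
    | some p => pvLoopA fuel (s.drop p.length)  -- normalized_sku[len(prefix):] : slice at a nonneg index = drop
    | none => s

def normalize_sku_for_comparison (sku : String) : String :=
  if sku = "" then sku
  else
    let s := PySem.Chars.strip sku.toList
    String.ofList (PySem.Chars.lower (pvLoopA s.length s))

-- ===== PORT B =====
-- the Python set literal _TOKENS (all members distinct)
def pvTokens : PySem.Set (List Char) :=
  PySem.Set.ofList
    ["deleted".toList, "ot".toList, "zstk".toList, "mg".toList, "lnd".toList,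
     "eu".toList, "us".toList, "uk".toList, "ca".toList, "au".toList, "jp".toList]

-- the 'while i < len(parts) - 1 and parts[i] in _TOKENS: i += 1' loop followed by parts[i:],
-- as structural recursion on the suffix parts[i:] (the 'i < len - 1' guard = at least two
-- segments remain)
def pvDropToks : List (List Char) → List (List Char)
  | [] => []
  | [x] => [x]
  | x :: y :: rest =>
    if pvTokens.contains x then pvDropToks (y :: rest) else x :: y :: rest

def normalize_sku_for_comparison_alt (sku : String) : String :=
  if sku = "" then sku
  else
    -- sku.strip().lower().split('-') : single-character split = List.splitOn (exact, keeps empty segments)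
    let parts := List.splitOn '-' (PySem.Chars.lower (PySem.Chars.strip sku.toList))
    String.ofList (PySem.Chars.join ['-'] (pvDropToks parts))  -- '-'.join(parts[i:])

-- ===== PRECONDITION & SPEC =====
def Spec_normalize_sku_for_comparison (sku : String) (out : String) : Prop := out = normalize_sku_for_comparison_alt sku
instance (sku : String) (out : String) : Decidable (Spec_normalize_sku_for_comparison sku out) := by unfold Spec_normalize_sku_for_comparison; infer_instance

-- ===== CLAIM (what is proved, stated in full; the proofs are below) =====
def Claim_equal_normalize_sku_for_comparison : Prop := ∀ (sku : String), Dom_normalize_sku_for_comparison sku → Spec_normalize_sku_for_comparison sku (normalize_sku_for_comparison sku)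

-- ===== LEMMAS AND PROOFS =====

-- proof-side helper: A's peeling loop re-expressed on the already-lowered string
def pvPrefixesL : List (List Char) :=
  ["deleted-".toList, "ot-".toList, "zstk-".toList, "mg-".toList, "lnd-".toList,
   "eu-".toList, "us-".toList, "uk-".toList, "ca-".toList, "au-".toList, "jp-".toList]

def pvPeel : Nat → List Char → List Char
  | 0, t => t
  | fuel + 1, t =>
    match pvPrefixesL.find? (fun p => PySem.Chars.startswith t p) with
    | some p => pvPeel fuel (t.drop p.length)
    | none => t

theorem pv_char_toNat_ofNat {n : Nat} (h : Nat.isValidChar n) : (Char.ofNat n).toNat = n := by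
  unfold Char.ofNat
  split
  · simp [Char.toNat, Char.ofNatAux]
  · exact absurd h ‹_›

theorem pv_char_le (a b : Char) : (a ≤ b) ↔ (a.toNat ≤ b.toNat) := ge_iff_le

theorem pv_lower_upper (c : Char) :
    PySem.Chars.lowerChar (PySem.Chars.upperChar c) = PySem.Chars.lowerChar c := by
  simp only [PySem.Chars.lowerChar, PySem.Chars.upperChar, PySem.Chars.islower, PySem.Chars.isupper,
    Bool.and_eq_true, decide_eq_true_eq, pv_char_le,
    show 'a'.toNat = 97 from rfl, show 'z'.toNat = 122 from rfl,
    show 'A'.toNat = 65 from rfl, show 'Z'.toNat = 90 from rfl]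
  by_cases hl : 97 ≤ c.toNat ∧ c.toNat ≤ 122
  · have ht : (Char.ofNat (c.toNat - 32)).toNat = c.toNat - 32 :=
      pv_char_toNat_ofNat (Or.inl (by omega))
    rw [if_pos hl, if_pos (by rw [ht]; omega), if_neg (by omega), ht,
      show c.toNat - 32 + 32 = c.toNat by omega, Char.ofNat_toNat]
  · rw [if_neg hl]

theorem pv_upper_lower (c : Char) :
    PySem.Chars.upperChar (PySem.Chars.lowerChar c) = PySem.Chars.upperChar c := by
  simp only [PySem.Chars.lowerChar, PySem.Chars.upperChar, PySem.Chars.islower, PySem.Chars.isupper,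
    Bool.and_eq_true, decide_eq_true_eq, pv_char_le,
    show 'a'.toNat = 97 from rfl, show 'z'.toNat = 122 from rfl,
    show 'A'.toNat = 65 from rfl, show 'Z'.toNat = 90 from rfl]
  by_cases hu : 65 ≤ c.toNat ∧ c.toNat ≤ 90
  · have ht : (Char.ofNat (c.toNat + 32)).toNat = c.toNat + 32 :=
      pv_char_toNat_ofNat (Or.inl (by omega))
    rw [if_pos hu, if_pos (by rw [ht]; omega), if_neg (by omega), ht,
      show c.toNat + 32 - 32 = c.toNat by omega, Char.ofNat_toNat]
  · rw [if_neg hu]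

theorem pv_lower_upper_list (s : List Char) :
    PySem.Chars.lower (PySem.Chars.upper s) = PySem.Chars.lower s := by
  simp only [PySem.Chars.lower, PySem.Chars.upper, List.map_map]
  exact List.map_congr_left (fun c _ => pv_lower_upper c)

theorem pv_upper_lower_list (s : List Char) :
    PySem.Chars.upper (PySem.Chars.lower s) = PySem.Chars.upper s := by
  simp only [PySem.Chars.lower, PySem.Chars.upper, List.map_map]
  exact List.map_congr_left (fun c _ => pv_upper_lower c)

theorem pv_prefix_iff (p s : List Char) (hp : PySem.Chars.upper p = p) :
    PySem.Chars.startswith (PySem.Chars.lower s) (PySem.Chars.lower p)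
      = PySem.Chars.startswith (PySem.Chars.upper s) p := by
  rw [Bool.eq_iff_iff, PySem.Chars.startswith_iff, PySem.Chars.startswith_iff]
  constructor
  · intro h
    have h2 := h.map PySem.Chars.upperChar
    rw [show (PySem.Chars.lower p).map PySem.Chars.upperChar = PySem.Chars.upper (PySem.Chars.lower p) from rfl,
        show (PySem.Chars.lower s).map PySem.Chars.upperChar = PySem.Chars.upper (PySem.Chars.lower s) from rfl,
        pv_upper_lower_list, pv_upper_lower_list, hp] at h2
    exact h2
  · intro h
    have h2 := h.map PySem.Chars.lowerChar
    rw [show (PySem.Chars.upper s).map PySem.Chars.lowerChar = PySem.Chars.lower (PySem.Chars.upper s) from rfl,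
        pv_lower_upper_list] at h2
    exact h2

theorem pv_find?_congr {α : Type} (p q : α → Bool) (l : List α)
    (h : ∀ a ∈ l, p a = q a) : l.find? p = l.find? q := by
  induction l with
  | nil => rfl
  | cons x xs ih =>
    simp only [List.find?_cons, h x List.mem_cons_self]
    cases q x with
    | true => rfl
    | false => exact ih (fun a ha => h a (List.mem_cons_of_mem x ha))

theorem pv_prefixesL_eq : pvPrefixesL = pvPrefixesA.map PySem.Chars.lower := by decide

theorem pv_prefixesA_upper : ∀ p ∈ pvPrefixesA, PySem.Chars.upper p = p := by decide

theorem pv_step_eq (s : List Char) :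
    pvPrefixesL.find? (fun p => PySem.Chars.startswith (PySem.Chars.lower s) p)
      = (pvStepA s).map PySem.Chars.lower := by
  rw [pv_prefixesL_eq, List.find?_map]
  unfold pvStepA
  congr 1
  exact pv_find?_congr _ _ _ (fun p hp => pv_prefix_iff p s (pv_prefixesA_upper p hp))

theorem pv_loop_eq (fuel : Nat) (s : List Char) :
    pvPeel fuel (PySem.Chars.lower s) = PySem.Chars.lower (pvLoopA fuel s) := by
  induction fuel generalizing s with
  | zero => rfl
  | succ fuel ih =>
    unfold pvPeel pvLoopA
    rw [pv_step_eq]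
    cases hs : pvStepA s with
    | none => rfl
    | some p =>
      simp only [Option.map_some]
      rw [show (PySem.Chars.lower p).length = p.length from List.length_map ..,
          show (PySem.Chars.lower s).drop p.length = PySem.Chars.lower (s.drop p.length) from
            (List.map_drop ..).symm]
      exact ih (s.drop p.length)

-- splitting a string that begins with a dash-free segment followed by a dash
theorem pv_splitOn_cons (x t' : List Char) (hx : '-' ∉ x) :
    List.splitOn '-' (x ++ '-' :: t') = x :: List.splitOn '-' t' := by
  induction x with
  | nil => simp [List.splitOn, List.splitOnP_cons]
  | cons c x ih =>
    have hc : c ≠ '-' := fun h => hx (h ▸ List.mem_cons_self)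
    have ihx := ih (fun h => hx (List.mem_cons_of_mem c h))
    simp only [List.splitOn] at ihx ⊢
    rw [List.cons_append, List.splitOnP_cons, if_neg (by simp [hc]), ihx]
    rfl

-- inversion: what the head of splitOn tells about the string
theorem pv_splitOn_inv (t : List Char) :
    ∀ x l, List.splitOn '-' t = x :: l →
      '-' ∉ x ∧ ((l = [] ∧ t = x) ∨ ∃ t', t = x ++ '-' :: t' ∧ List.splitOn '-' t' = l) := by
  induction t with
  | nil =>
    intro x l h
    simp only [List.splitOn_nil] at h
    injection h with h1 h2
    subst h1; subst h2
    exact ⟨by simp, Or.inl ⟨rfl, rfl⟩⟩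
  | cons c t ih =>
    intro x l h
    by_cases hc : c = '-'
    · subst hc
      simp only [List.splitOn, List.splitOnP_cons, beq_self_eq_true, if_pos] at h
      injection h with h1 h2
      subst h1; subst h2
      exact ⟨by simp, Or.inr ⟨t, rfl, rfl⟩⟩
    · simp only [List.splitOn, List.splitOnP_cons, beq_iff_eq, if_neg hc] at h
      obtain ⟨x', l', hsp⟩ : ∃ x' l', List.splitOnP (fun a => a == '-') t = x' :: l' := by
        cases hs : List.splitOnP (fun a => a == '-') t with
        | nil => exact absurd hs (List.splitOnP_ne_nil _ t)
        | cons a b => exact ⟨a, b, rfl⟩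
      rw [hsp] at h
      simp only [List.modifyHead] at h
      injection h with h1 h2
      subst h1; subst h2
      obtain ⟨hnx', hrest⟩ := ih x' l' hsp
      refine ⟨?_, ?_⟩
      · intro hm
        rcases List.mem_cons.mp hm with hm | hm
        · exact hc hm.symm
        · exact hnx' hm
      · rcases hrest with ⟨rfl, rfl⟩ | ⟨t', rfl, ht'⟩
        · exact Or.inl ⟨rfl, rfl⟩
        · exact Or.inr ⟨t', rfl, ht'⟩

theorem pv_prefixesL_map : pvPrefixesL = pvTokens.map (fun tok => tok ++ ['-']) := by decide

theorem pv_tokens_no_dash : ∀ tok ∈ pvTokens, '-' ∉ tok := by decide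

-- the A-side peel on the lowered string computes B's split/drop/join
theorem pv_peel_eq (fuel : Nat) (t : List Char) (hf : t.length ≤ fuel) :
    pvPeel fuel t = PySem.Chars.join ['-'] (pvDropToks (List.splitOn '-' t)) := by
  induction fuel generalizing t with
  | zero =>
    have : t = [] := List.eq_nil_of_length_eq_zero (Nat.le_zero.mp hf)
    subst this; decide
  | succ fuel ih =>
    unfold pvPeel
    cases hfind : pvPrefixesL.find? (fun p => PySem.Chars.startswith t p) with
    | none =>
      have hnone := List.find?_eq_none.mp hfind
      obtain ⟨x, l, hsp⟩ : ∃ x l, List.splitOn '-' t = x :: l := by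
        cases hs : List.splitOn '-' t with
        | nil => exact absurd hs (by simpa [List.splitOn] using List.splitOnP_ne_nil (fun a => a == '-') t)
        | cons a b => exact ⟨a, b, rfl⟩
      have hdrop : pvDropToks (List.splitOn '-' t) = List.splitOn '-' t := by
        rw [hsp]
        cases l with
        | nil => rfl
        | cons y rest =>
          have hxnot : pvTokens.contains x = false := by
            by_contra hcon
            have hmem : x ∈ pvTokens := by
              have := Bool.not_eq_false _ |>.mp hcon
              simpa using this
            obtain ⟨hnx, hrest⟩ := pv_splitOn_inv t x (y :: rest) hsp
            rcases hrest with ⟨h1, _⟩ | ⟨t', rfl, _⟩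
            · exact absurd h1 (by simp)
            · have hp : (x ++ ['-']) ∈ pvPrefixesL := by
                rw [pv_prefixesL_map]; exact List.mem_map_of_mem hmem
              have := hnone _ hp
              rw [PySem.Chars.startswith_iff] at this
              exact this ⟨t', by simp⟩
          unfold pvDropToks
          rw [hxnot]; rfl
      rw [hdrop]
      exact (show PySem.Chars.join ['-'] (List.splitOn '-' t) = t from
        List.intercalate_splitOn t '-').symm
    | some p =>
      have hpmem := List.mem_of_find?_eq_some hfind
      have hpsw := List.find?_some hfind
      obtain ⟨tok, htokmem, rfl⟩ : ∃ tok, tok ∈ pvTokens ∧ tok ++ ['-'] = p := by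
        rw [pv_prefixesL_map] at hpmem
        simpa using hpmem
      rw [PySem.Chars.startswith_iff] at hpsw
      obtain ⟨t', rfl⟩ := hpsw
      show pvPeel fuel (List.drop (tok ++ ['-']).length (tok ++ ['-'] ++ t'))
          = PySem.Chars.join ['-'] (pvDropToks (List.splitOn '-' (tok ++ ['-'] ++ t')))
      have hdropt : ((tok ++ ['-']) ++ t').drop (tok ++ ['-']).length = t' := by
        simp
      rw [hdropt]
      have harr : (tok ++ ['-']) ++ t' = tok ++ '-' :: t' := by simp
      rw [harr, pv_splitOn_cons tok t' (pv_tokens_no_dash tok htokmem)]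
      obtain ⟨z, l', hsp'⟩ : ∃ z l', List.splitOn '-' t' = z :: l' := by
        cases hs : List.splitOn '-' t' with
        | nil => exact absurd hs (by simpa [List.splitOn] using List.splitOnP_ne_nil (fun a => a == '-') t')
        | cons a b => exact ⟨a, b, rfl⟩
      have hcont : pvTokens.contains tok = true := List.elem_eq_true_of_mem htokmem
      rw [hsp']
      unfold pvDropToks
      rw [hcont]
      simp only [if_true]
      rw [← hsp']
      exact ih t' (by simp at hf ⊢; omega)

-- ===== VERDICT (by name: the statement is the Claim_ definition above) =====
theorem normalize_sku_for_comparison_spec : Claim_equal_normalize_sku_for_comparison := by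
  intro sku _
  unfold Spec_normalize_sku_for_comparison
  unfold normalize_sku_for_comparison normalize_sku_for_comparison_alt
  by_cases h : sku = ""
  · simp [h]
  · rw [if_neg h, if_neg h]
    have hlen : (PySem.Chars.lower (PySem.Chars.strip sku.toList)).length
        = (PySem.Chars.strip sku.toList).length := List.length_map ..
    show String.ofList (PySem.Chars.lower (pvLoopA (PySem.Chars.strip sku.toList).length
          (PySem.Chars.strip sku.toList)))
        = String.ofList (PySem.Chars.join ['-'] (pvDropToks (List.splitOn '-'
            (PySem.Chars.lower (PySem.Chars.strip sku.toList)))))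
    rw [← pv_loop_eq, pv_peel_eq _ _ (le_of_eq hlen)]
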